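-- pv_equiv track=rewrite | github.com/damoc1es/AdventOfCode-2023 | src/day01.py | part2
-- ===== SOURCE A (Python) =====
-- def part2(inp: list[str]) -> int:
--     S = 0
--     for line in inp:
--         digits = {"1": "one", "2": "two", "3": "three", "4": "four", "5": "five", "6": "six", "7": "seven", "8": "eight", "9": "nine"}
--         x = y = 0
--         place_x = place_y = None
--
--         for k, v in digits.items():
--             digit0, digit1 = line.find(k), line.rfind(k)
--             string0, string1 = line.find(v), line.rfind(v)
--             value = int(k)
--
--             if digit0 != -1:
--                 if place_x is None or digit0 < place_x:
--                     place_x, x = digit0, value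
--
--                 if place_y is None or digit1 > place_y:
--                     place_y, y = digit1, value
--
--             if string0 != -1:
--                 if place_x is None or string0 < place_x:
--                     place_x, x = string0, value
--
--                 if place_y is None or string1 > place_y:
--                     place_y, y = string1, value
--
--         S += x*10+y
--
--     return S
-- ===== SOURCE B (Python) =====
-- PATTERNS = [("1", 1), ("2", 2), ("3", 3), ("4", 4), ("5", 5), ("6", 6), ("7", 7), ("8", 8), ("9", 9),
--             ("one", 1), ("two", 2), ("three", 3), ("four", 4), ("five", 5),
--             ("six", 6), ("seven", 7), ("eight", 8), ("nine", 9)]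
--
--
-- def part2(inp: list[str]) -> int:
--     total = 0
--     for line in inp:
--         vals = []
--         for i in range(len(line)):
--             for p, v in PATTERNS:
--                 if line.startswith(p, i):
--                     vals.append(v)
--                     break
--         if vals:
--             total += vals[0] * 10 + vals[-1]
--     return total
-- ===== Notes on version B (the rewrite author's own statement) =====
-- stated objective: simpler
-- what changed: Instead of taking min/max over 18 per-pattern find/rfind scans while juggling optional best-position state, B does one left-to-right scan of each line collecting the digit value matched at each position (anchored startswith), then adds first*10+last (0 if none).
import Mathlib
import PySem

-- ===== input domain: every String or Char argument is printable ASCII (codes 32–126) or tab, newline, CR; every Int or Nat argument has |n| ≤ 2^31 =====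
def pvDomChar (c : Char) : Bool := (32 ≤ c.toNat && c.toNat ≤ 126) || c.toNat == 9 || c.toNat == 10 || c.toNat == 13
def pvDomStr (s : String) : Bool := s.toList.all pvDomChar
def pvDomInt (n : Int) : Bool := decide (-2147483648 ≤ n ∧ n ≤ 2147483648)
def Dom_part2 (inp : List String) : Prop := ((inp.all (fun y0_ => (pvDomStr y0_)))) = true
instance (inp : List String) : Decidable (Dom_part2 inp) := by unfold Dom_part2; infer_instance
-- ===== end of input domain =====

-- B replaces A's per-pattern find/rfind scans with optional best-position bookkeeping by one
-- left-to-right positional scan per line collecting matched digit values, then first*10+last;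
-- objective: simpler.

-- ===== PORT A =====
-- the dict literal digits.items(), in insertion order
def entriesA : List (String × String) :=
  [("1", "one"), ("2", "two"), ("3", "three"), ("4", "four"), ("5", "five"),
   ("6", "six"), ("7", "seven"), ("8", "eight"), ("9", "nine")]

-- Python's 'place is None or p < place' / 'place is None or p > place'
def noneOrLt (o : Option Int) (p : Int) : Bool :=
  match o with
  | none => true
  | some m => decide (p < m)

def noneOrGt (o : Option Int) (p : Int) : Bool :=
  match o with
  | none => true
  | some m => decide (m < p)

-- the body of A's inner 'for k, v in digits.items()' loop; state is (x, y, place_x, place_y)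
def stepA (line : String) (st : Int × Int × Option Int × Option Int) (kv : String × String) :
    Int × Int × Option Int × Option Int :=
  match st with
  | (x, y, px, py) =>
    let digit0 := PySem.Str.find line kv.1
    let digit1 := PySem.Str.rfind line kv.1
    let string0 := PySem.Str.find line kv.2
    let string1 := PySem.Str.rfind line kv.2
    let value := (PySem.Int.ofStr? kv.1).getD 0   -- int(k); k is a digit literal so this is exact
    let s1 : Int × Int × Option Int × Option Int :=
      if digit0 ≠ -1 then
        let (px', x') := if noneOrLt px digit0 then (some digit0, value) else (px, x)
        let (py', y') := if noneOrGt py digit1 then (some digit1, value) else (py, y)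
        (x', y', px', py')
      else (x, y, px, py)
    match s1 with
    | (x, y, px, py) =>
      if string0 ≠ -1 then
        let (px', x') := if noneOrLt px string0 then (some string0, value) else (px, x)
        let (py', y') := if noneOrGt py string1 then (some string1, value) else (py, y)
        (x', y', px', py')
      else (x, y, px, py)

def lineValA (line : String) : Int :=
  let r := entriesA.foldl (stepA line) (0, 0, none, none)
  r.1 * 10 + r.2.1

def part2 (inp : List String) : Int :=
  inp.foldl (fun S line => S + lineValA line) 0

-- ===== PORT B =====
def patternsB : List (String × Int) :=
  [("1", 1), ("2", 2), ("3", 3), ("4", 4), ("5", 5), ("6", 6), ("7", 7), ("8", 8), ("9", 9),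
   ("one", 1), ("two", 2), ("three", 3), ("four", 4), ("five", 5),
   ("six", 6), ("seven", 7), ("eight", 8), ("nine", 9)]

-- inner 'for p, v in PATTERNS: if line.startswith(p, i): vals.append(v); break';
-- line.startswith(p, i) with 0 ≤ i ≤ len(line) is exactly p.toList <+: line.toList.drop i
def matchAtB (line : String) (i : Nat) : Option Int :=
  patternsB.findSome? (fun pv =>
    if PySem.Chars.startswith (line.toList.drop i) pv.1.toList then some pv.2 else none)

def lineValB (line : String) : Int :=
  let vals := (List.range line.toList.length).filterMap (matchAtB line)
  match vals with
  | [] => 0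
  | a :: rest => a * 10 + (a :: rest).getLast (by simp)

def part2_alt (inp : List String) : Int :=
  inp.foldl (fun total line => total + lineValB line) 0

-- ===== PRECONDITION & SPEC =====
def Spec_part2 (inp : List String) (out : Int) : Prop := out = part2_alt inp
instance (inp : List String) (out : Int) : Decidable (Spec_part2 inp out) := by unfold Spec_part2; infer_instance

-- ===== CLAIM (what is proved, stated in full; the proofs are below) =====
def Claim_equal_part2 : Prop := ∀ (inp : List String), Dom_part2 inp → Spec_part2 inp (part2 inp)

-- ===== LEMMAS AND PROOFS =====

-- a position of the line where some pattern matches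
def MatchI (l : List Char) (i : Nat) : Prop :=
  ∃ pv ∈ patternsB, pv.1.toList <+: l.drop i

lemma patterns_no_prefix :
    ∀ pv ∈ patternsB, ∀ pv' ∈ patternsB, pv.1.toList <+: pv'.1.toList → pv = pv' := by
  decide

lemma patterns_ne_nil : ∀ pv ∈ patternsB, pv.1.toList ≠ [] := by decide

-- at most one pattern matches at a given position
lemma match_unique {l : List Char} {i : Nat} {pv pv' : String × Int}
    (h : pv ∈ patternsB) (h' : pv' ∈ patternsB)
    (hp : pv.1.toList <+: l.drop i) (hp' : pv'.1.toList <+: l.drop i) : pv = pv' := by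
  rcases List.prefix_or_prefix_of_prefix hp hp' with hh | hh
  · exact patterns_no_prefix pv h pv' h' hh
  · exact (patterns_no_prefix pv' h' pv h hh).symm

lemma matchAtB_eq_none_iff {line : String} {i : Nat} :
    matchAtB line i = none ↔ ¬ MatchI line.toList i := by
  unfold matchAtB MatchI
  rw [List.findSome?_eq_none_iff]
  constructor
  · rintro h ⟨pv, hpv, hpre⟩
    have := h pv hpv
    rw [if_pos (by exact (PySem.Chars.startswith_iff _ _).mpr hpre)] at this
    exact Option.some_ne_none _ this
  · intro h pv hpv
    by_cases hb : PySem.Chars.startswith (line.toList.drop i) pv.1.toList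
    · exact absurd ⟨pv, hpv, (PySem.Chars.startswith_iff _ _).mp hb⟩ h
    · simp [hb]

lemma matchAtB_eq_some {line : String} {i : Nat} {pv : String × Int}
    (h : pv ∈ patternsB) (hp : pv.1.toList <+: line.toList.drop i) :
    matchAtB line i = some pv.2 := by
  have hne : matchAtB line i ≠ none := fun hn =>
    (matchAtB_eq_none_iff.mp hn) ⟨pv, h, hp⟩
  rcases Option.ne_none_iff_exists'.mp hne with ⟨b, hb⟩
  rcases List.findSome?_eq_some_iff.mp hb with ⟨l₁, pv', l₂, heq, hf, -⟩
  have hmem' : pv' ∈ patternsB := by rw [heq]; simp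
  by_cases hs : PySem.Chars.startswith (line.toList.drop i) pv'.1.toList
  · have hpre' := (PySem.Chars.startswith_iff _ _).mp hs
    have : pv' = pv := match_unique hmem' h hpre' hp
    rw [if_pos hs] at hf
    rw [hb, ← hf, this]
  · rw [if_neg hs] at hf; exact absurd hf (by simp)

lemma matchI_lt_length {l : List Char} {i : Nat} (h : MatchI l i) : i < l.length := by
  rcases h with ⟨pv, hpv, hp⟩
  by_contra hge
  rw [List.drop_eq_nil_of_le (le_of_not_gt hge)] at hp
  exact patterns_ne_nil pv hpv (List.prefix_nil.mp hp)

-- ---------- rfind characterization ----------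
lemma rfind_go_spec (l p : List Char) :
    ∀ n : Nat,
      (PySem.Chars.rfind.go l p n = -1 ∧ ∀ j ≤ n, ¬ p <+: l.drop j) ∨
      (∃ j : Nat, j ≤ n ∧ p <+: l.drop j ∧ PySem.Chars.rfind.go l p n = (j : Int) ∧
        ∀ k, j < k → k ≤ n → ¬ p <+: l.drop k) := by
  intro n
  induction n with
  | zero =>
    by_cases h : p.isPrefixOf l
    · right
      exact ⟨0, le_refl 0, by simpa using List.isPrefixOf_iff_prefix.mp h,
        by simp [PySem.Chars.rfind.go, h], by omega⟩
    · left
      refine ⟨by simp [PySem.Chars.rfind.go, h], ?_⟩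
      intro j hj
      interval_cases j
      simpa using fun hp => h (List.isPrefixOf_iff_prefix.mpr (by simpa using hp))
  | succ m ih =>
    by_cases h : p.isPrefixOf (List.drop (m + 1) l)
    · right
      exact ⟨m + 1, le_refl _, List.isPrefixOf_iff_prefix.mp h,
        by simp [PySem.Chars.rfind.go, h], by omega⟩
    · have hnp : ¬ p <+: l.drop (m + 1) := fun hp => h (List.isPrefixOf_iff_prefix.mpr hp)
      have hgo : PySem.Chars.rfind.go l p (m + 1) = PySem.Chars.rfind.go l p m := by
        simp [PySem.Chars.rfind.go, h]
      rcases ih with ⟨he, hall⟩ | ⟨j, hj, hpre, heq, hmax⟩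
      · left
        refine ⟨hgo ▸ he, fun j hj => ?_⟩
        rcases Nat.lt_or_ge j (m + 1) with hlt | hge
        · exact hall j (by omega)
        · have : j = m + 1 := by omega
          exact this ▸ hnp
      · right
        refine ⟨j, by omega, hpre, hgo ▸ heq, fun k hk1 hk2 => ?_⟩
        rcases Nat.lt_or_ge k (m + 1) with hlt | hge
        · exact hmax k hk1 (by omega)
        · have : k = m + 1 := by omega
          exact this ▸ hnp

-- ---------- A-side: flattening to candidate lists ----------
def stepX (st : Option Int × Int) (c : Int × Int) : Option Int × Int :=
  if noneOrLt st.1 c.1 then (some c.1, c.2) else st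

def stepY (st : Option Int × Int) (c : Int × Int) : Option Int × Int :=
  if noneOrGt st.1 c.1 then (some c.1, c.2) else st

def candOfX (line : String) (kv : String × String) : List (Int × Int) :=
  (if PySem.Str.find line kv.1 ≠ -1
     then [(PySem.Str.find line kv.1, (PySem.Int.ofStr? kv.1).getD 0)] else []) ++
  (if PySem.Str.find line kv.2 ≠ -1
     then [(PySem.Str.find line kv.2, (PySem.Int.ofStr? kv.1).getD 0)] else [])

def candOfY (line : String) (kv : String × String) : List (Int × Int) :=
  (if PySem.Str.find line kv.1 ≠ -1
     then [(PySem.Str.rfind line kv.1, (PySem.Int.ofStr? kv.1).getD 0)] else []) ++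
  (if PySem.Str.find line kv.2 ≠ -1
     then [(PySem.Str.rfind line kv.2, (PySem.Int.ofStr? kv.1).getD 0)] else [])

lemma stepA_decompose (line : String) (kv : String × String)
    (x y : Int) (px py : Option Int) :
    stepA line (x, y, px, py) kv =
      (((candOfX line kv).foldl stepX (px, x)).2,
       ((candOfY line kv).foldl stepY (py, y)).2,
       ((candOfX line kv).foldl stepX (px, x)).1,
       ((candOfY line kv).foldl stepY (py, y)).1) := by
  unfold stepA candOfX candOfY
  split_ifs <;> simp [stepX, stepY, List.foldl] <;> split_ifs <;> simp_all

lemma foldA_decompose (line : String) (es : List (String × String))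
    (x y : Int) (px py : Option Int) :
    es.foldl (stepA line) (x, y, px, py) =
      (((es.flatMap (candOfX line)).foldl stepX (px, x)).2,
       ((es.flatMap (candOfY line)).foldl stepY (py, y)).2,
       ((es.flatMap (candOfX line)).foldl stepX (px, x)).1,
       ((es.flatMap (candOfY line)).foldl stepY (py, y)).1) := by
  induction es generalizing x y px py with
  | nil => simp
  | cons kv es ih =>
    rw [List.foldl_cons, stepA_decompose]
    rw [ih]
    simp [List.flatMap_cons, List.foldl_append]

-- ---------- fold/min characterizations ----------
def selL (a : Int × Int) (cs : List (Int × Int)) : Int × Int :=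
  cs.foldl (fun b c => if c.1 < b.1 then c else b) a

def selG (a : Int × Int) (cs : List (Int × Int)) : Int × Int :=
  cs.foldl (fun b c => if b.1 < c.1 then c else b) a

lemma stepX_some (m x : Int) (c : Int × Int) :
    stepX (some m, x) c = if c.1 < m then (some c.1, c.2) else (some m, x) := by
  unfold stepX noneOrLt
  by_cases h : c.1 < m <;> simp [h]

lemma stepY_some (m y : Int) (c : Int × Int) :
    stepY (some m, y) c = if m < c.1 then (some c.1, c.2) else (some m, y) := by
  unfold stepY noneOrGt
  by_cases h : m < c.1 <;> simp [h]

lemma foldl_stepX_some (cs : List (Int × Int)) :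
    ∀ (m x : Int), cs.foldl stepX (some m, x) = (some (selL (m, x) cs).1, (selL (m, x) cs).2) := by
  induction cs with
  | nil => intro m x; simp [selL]
  | cons c cs ih =>
    intro m x
    rw [List.foldl_cons, stepX_some]
    show _ = (some (selL (m, x) (c :: cs)).1, (selL (m, x) (c :: cs)).2)
    simp only [selL, List.foldl_cons]
    by_cases h : c.1 < m
    · rw [if_pos h, if_pos (show c.1 < (m, x).1 from h)]
      simpa [selL] using ih c.1 c.2
    · rw [if_neg h, if_neg (show ¬ c.1 < (m, x).1 from h)]
      simpa [selL] using ih m x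

lemma foldl_stepY_some (cs : List (Int × Int)) :
    ∀ (m y : Int), cs.foldl stepY (some m, y) = (some (selG (m, y) cs).1, (selG (m, y) cs).2) := by
  induction cs with
  | nil => intro m y; simp [selG]
  | cons c cs ih =>
    intro m y
    rw [List.foldl_cons, stepY_some]
    show _ = (some (selG (m, y) (c :: cs)).1, (selG (m, y) (c :: cs)).2)
    simp only [selG, List.foldl_cons]
    by_cases h : m < c.1
    · rw [if_pos h, if_pos (show (m, y).1 < c.1 from h)]
      simpa [selG] using ih c.1 c.2
    · rw [if_neg h, if_neg (show ¬ (m, y).1 < c.1 from h)]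
      simpa [selG] using ih m y

lemma selL_cons (a c : Int × Int) (cs : List (Int × Int)) :
    selL a (c :: cs) = if c.1 < a.1 then selL c cs else selL a cs := by
  simp only [selL, List.foldl_cons]
  by_cases h : c.1 < a.1 <;> simp [h]

lemma selG_cons (a c : Int × Int) (cs : List (Int × Int)) :
    selG a (c :: cs) = if a.1 < c.1 then selG c cs else selG a cs := by
  simp only [selG, List.foldl_cons]
  by_cases h : a.1 < c.1 <;> simp [h]

lemma selL_mem_le (cs : List (Int × Int)) :
    ∀ a, selL a cs ∈ a :: cs ∧ ∀ c ∈ a :: cs, (selL a cs).1 ≤ c.1 := by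
  induction cs with
  | nil => intro a; simp [selL]
  | cons c cs ih =>
    intro a
    rw [selL_cons]
    by_cases h : c.1 < a.1
    · rw [if_pos h]
      rcases ih c with ⟨hmem, hle⟩
      refine ⟨List.mem_cons_of_mem a hmem, ?_⟩
      intro d hd
      rcases List.mem_cons.mp hd with h' | h'
      · subst h'; have := hle c (by simp); omega
      · exact hle d h'
    · rw [if_neg h]
      rcases ih a with ⟨hmem, hle⟩
      refine ⟨?_, ?_⟩
      · rcases List.mem_cons.mp hmem with h' | h' <;> simp [h']
      · intro d hd
        rcases List.mem_cons.mp hd with h' | h'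
        · rw [h']; exact hle a (by simp)
        · rcases List.mem_cons.mp h' with h'' | h''
          · rw [h'']; have := hle a (by simp); omega
          · exact hle d (List.mem_cons_of_mem a h'')

lemma selG_mem_le (cs : List (Int × Int)) :
    ∀ a, selG a cs ∈ a :: cs ∧ ∀ c ∈ a :: cs, c.1 ≤ (selG a cs).1 := by
  induction cs with
  | nil => intro a; simp [selG]
  | cons c cs ih =>
    intro a
    rw [selG_cons]
    by_cases h : a.1 < c.1
    · rw [if_pos h]
      rcases ih c with ⟨hmem, hle⟩
      refine ⟨List.mem_cons_of_mem a hmem, ?_⟩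
      intro d hd
      rcases List.mem_cons.mp hd with h' | h'
      · subst h'; have := hle c (by simp); omega
      · exact hle d h'
    · rw [if_neg h]
      rcases ih a with ⟨hmem, hle⟩
      refine ⟨?_, ?_⟩
      · rcases List.mem_cons.mp hmem with h' | h' <;> simp [h']
      · intro d hd
        rcases List.mem_cons.mp hd with h' | h'
        · rw [h']; exact hle a (by simp)
        · rcases List.mem_cons.mp h' with h'' | h''
          · rw [h'']; have := hle a (by simp); omega
          · exact hle d (List.mem_cons_of_mem a h'')

lemma selL_eq_of_min {a : Int × Int} {cs : List (Int × Int)} {mv : Int × Int}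
    (hm : mv ∈ a :: cs) (hmin : ∀ c ∈ a :: cs, c ≠ mv → mv.1 < c.1) : selL a cs = mv := by
  rcases selL_mem_le cs a with ⟨hmem, hle⟩
  by_contra hne
  have h1 := hmin _ hmem hne
  have h2 := hle mv hm
  omega

lemma selG_eq_of_max {a : Int × Int} {cs : List (Int × Int)} {mv : Int × Int}
    (hm : mv ∈ a :: cs) (hmax : ∀ c ∈ a :: cs, c ≠ mv → c.1 < mv.1) : selG a cs = mv := by
  rcases selG_mem_le cs a with ⟨hmem, hle⟩
  by_contra hne
  have h1 := hmax _ hmem hne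
  have h2 := hle mv hm
  omega

-- ---------- candidate-list membership ----------
lemma entries_to_patterns :
    ∀ kv ∈ entriesA, (kv.1, (PySem.Int.ofStr? kv.1).getD 0) ∈ patternsB ∧
      (kv.2, (PySem.Int.ofStr? kv.1).getD 0) ∈ patternsB := by
  decide

lemma patterns_to_entries :
    ∀ pv ∈ patternsB, ∃ kv ∈ entriesA,
      (pv.1 = kv.1 ∨ pv.1 = kv.2) ∧ pv.2 = (PySem.Int.ofStr? kv.1).getD 0 := by
  decide

lemma candX_mem {line : String} {c : Int × Int} :
    c ∈ entriesA.flatMap (candOfX line) ↔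
      ∃ pv ∈ patternsB, PySem.Str.find line pv.1 ≠ -1 ∧
        c = (PySem.Str.find line pv.1, pv.2) := by
  rw [List.mem_flatMap]
  constructor
  · rintro ⟨kv, hkv, hc⟩
    unfold candOfX at hc
    rcases List.mem_append.mp hc with h | h <;> split_ifs at h with hf <;>
      simp at h
    · exact ⟨(kv.1, (PySem.Int.ofStr? kv.1).getD 0), (entries_to_patterns kv hkv).1, hf, h⟩
    · exact ⟨(kv.2, (PySem.Int.ofStr? kv.1).getD 0), (entries_to_patterns kv hkv).2, hf, h⟩
  · rintro ⟨pv, hpv, hf, hc⟩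
    rcases patterns_to_entries pv hpv with ⟨kv, hkv, hor, hval⟩
    refine ⟨kv, hkv, ?_⟩
    unfold candOfX
    rcases hor with h1 | h1 <;> rw [List.mem_append]
    · left; rw [← h1, if_pos hf]; simp [hc, hval, h1]
    · right; rw [← h1, if_pos hf]; simp [hc, hval, h1]

lemma candY_mem {line : String} {c : Int × Int} :
    c ∈ entriesA.flatMap (candOfY line) ↔
      ∃ pv ∈ patternsB, PySem.Str.find line pv.1 ≠ -1 ∧
        c = (PySem.Str.rfind line pv.1, pv.2) := by
  rw [List.mem_flatMap]
  constructor
  · rintro ⟨kv, hkv, hc⟩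
    unfold candOfY at hc
    rcases List.mem_append.mp hc with h | h <;> split_ifs at h with hf <;>
      simp at h
    · exact ⟨(kv.1, (PySem.Int.ofStr? kv.1).getD 0), (entries_to_patterns kv hkv).1, hf, h⟩
    · exact ⟨(kv.2, (PySem.Int.ofStr? kv.1).getD 0), (entries_to_patterns kv hkv).2, hf, h⟩
  · rintro ⟨pv, hpv, hf, hc⟩
    rcases patterns_to_entries pv hpv with ⟨kv, hkv, hor, hval⟩
    refine ⟨kv, hkv, ?_⟩
    unfold candOfY
    rcases hor with h1 | h1 <;> rw [List.mem_append]
    · left; rw [← h1, if_pos hf]; simp [hc, hval, h1]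
    · right; rw [← h1, if_pos hf]; simp [hc, hval, h1]

-- ---------- find / rfind of a present pattern ----------
lemma find_eq_first {line : String} {p : String} (i : Nat)
    (hpre : p.toList <+: line.toList.drop i)
    (hmin : ∀ j < i, ¬ p.toList <+: line.toList.drop j) :
    PySem.Str.find line p = (i : Int) := by
  rw [PySem.Str.find_eq]
  have hinf : p.toList <:+: line.toList :=
    (PySem.Chars.isIn_iff_infix _ _).mp
      ((PySem.Chars.exists_prefix_drop_iff_isIn _ _).mp ⟨i, hpre⟩)
  have hpos : 0 ≤ PySem.Chars.find line.toList p.toList :=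
    (PySem.Chars.find_nonneg_iff _ _).mpr hinf
  rcases PySem.Chars.find_spec hpos with ⟨hp, hm⟩
  have h1 : ¬ i < (PySem.Chars.find line.toList p.toList).toNat := fun hlt => hm i hlt hpre
  have h2 : ¬ (PySem.Chars.find line.toList p.toList).toNat < i := fun hlt => hmin _ hlt hp
  omega

lemma rfind_eq_last {line : String} {p : String} (i : Nat)
    (hne : p.toList ≠ [])
    (hpre : p.toList <+: line.toList.drop i)
    (hmax : ∀ j, i < j → ¬ p.toList <+: line.toList.drop j) :
    PySem.Str.rfind line p = (i : Int) := by
  rw [PySem.Str.rfind_eq]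
  have hilen : i < line.toList.length := by
    by_contra hgt
    rw [List.drop_eq_nil_of_le (by omega)] at hpre
    exact hne (List.prefix_nil.mp hpre)
  unfold PySem.Chars.rfind
  rcases rfind_go_spec line.toList p.toList line.toList.length with
    ⟨-, hall⟩ | ⟨j, hj, hp, heq, hmaxgo⟩
  · exact absurd hpre (hall i (by omega))
  · have h1 : ¬ i < j := fun hlt => hmax j hlt hp
    have h2 : ¬ j < i := fun hlt => hmaxgo i hlt (by omega) hpre
    have : j = i := by omega
    rw [heq, this]

-- ---------- per-line equality ----------
lemma lineVal_eq (line : String) : lineValA line = lineValB line := by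
  letI : DecidablePred (MatchI line.toList) := fun _ => Classical.dec _
  by_cases hex : ∃ i, MatchI line.toList i
  · -- some pattern matches somewhere
    have hexd : ∃ i, MatchI line.toList i := hex
    obtain ⟨i0, hi0⟩ := hex
    have hi0n : i0 < line.toList.length := matchI_lt_length hi0
    -- least and greatest matching positions
    set iF := Nat.find hexd with hiFdef
    have hF : MatchI line.toList iF := Nat.find_spec hexd
    have hFmin : ∀ j < iF, ¬ MatchI line.toList j := fun j hj => Nat.find_min hexd hj
    set jG := Nat.findGreatest (MatchI line.toList) line.toList.length with hjGdef
    have hG : MatchI line.toList jG := Nat.findGreatest_spec (le_of_lt hi0n) hi0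
    have hGmax : ∀ k, jG < k → ¬ MatchI line.toList k := by
      intro k hk
      by_cases hkn : k ≤ line.toList.length
      · exact Nat.findGreatest_is_greatest hk hkn
      · exact fun hm => absurd (matchI_lt_length hm) (by omega)
    obtain ⟨pvF, hpvF, hpreF⟩ := hF
    obtain ⟨pvG, hpvG, hpreG⟩ := hG
    have hiFn : iF < line.toList.length := matchI_lt_length ⟨pvF, hpvF, hpreF⟩
    have hjGn : jG < line.toList.length := matchI_lt_length ⟨pvG, hpvG, hpreG⟩
    -- find/rfind of the extremal patterns
    have hfindF : PySem.Str.find line pvF.1 = (iF : Int) :=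
      find_eq_first iF hpreF (fun j hj hp => hFmin j hj ⟨pvF, hpvF, hp⟩)
    have hrfindG : PySem.Str.rfind line pvG.1 = (jG : Int) :=
      rfind_eq_last jG (patterns_ne_nil pvG hpvG) hpreG
        (fun j hj hp => hGmax j hj ⟨pvG, hpvG, hp⟩)
    -- the extremal candidates are in the candidate lists
    have hmemX : ((iF : Int), pvF.2) ∈ entriesA.flatMap (candOfX line) :=
      candX_mem.mpr ⟨pvF, hpvF, by rw [hfindF]; omega, by rw [hfindF]⟩
    have hmemY : ((jG : Int), pvG.2) ∈ entriesA.flatMap (candOfY line) :=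
      candY_mem.mpr ⟨pvG, hpvG,
        by
          rw [PySem.Str.find_eq]
          have : pvG.1.toList <:+: line.toList :=
            (PySem.Chars.isIn_iff_infix _ _).mp
              ((PySem.Chars.exists_prefix_drop_iff_isIn _ _).mp ⟨jG, hpreG⟩)
          have := (PySem.Chars.find_nonneg_iff line.toList pvG.1.toList).mpr this
          omega,
        by rw [hrfindG]⟩
    -- strict extremality among all candidates
    have hminX : ∀ c ∈ entriesA.flatMap (candOfX line), c ≠ ((iF : Int), pvF.2) →
        (iF : Int) < c.1 := by
      rintro c hc hcne
      obtain ⟨pv, hpv, hf, rfl⟩ := candX_mem.mp hc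
      rw [PySem.Str.find_eq] at hf ⊢
      have hge : 0 ≤ PySem.Chars.find line.toList pv.1.toList := by
        have := PySem.Chars.neg_one_le_find line.toList pv.1.toList
        omega
      rcases PySem.Chars.find_spec hge with ⟨hp, -⟩
      have hle : iF ≤ (PySem.Chars.find line.toList pv.1.toList).toNat :=
        Nat.find_le ⟨pv, hpv, hp⟩
      rcases Nat.lt_or_ge iF (PySem.Chars.find line.toList pv.1.toList).toNat with h | h
      · omega
      · have heq : (PySem.Chars.find line.toList pv.1.toList).toNat = iF := by omega
        have : pv = pvF := match_unique hpv hpvF (heq ▸ hp) hpreF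
        subst this
        exfalso
        apply hcne
        have hfind : PySem.Str.find line pv.1 = (iF : Int) := by
          rw [PySem.Str.find_eq]; omega
        rw [hfind]
    have hmaxY : ∀ c ∈ entriesA.flatMap (candOfY line), c ≠ ((jG : Int), pvG.2) →
        c.1 < (jG : Int) := by
      rintro c hc hcne
      obtain ⟨pv, hpv, hf, rfl⟩ := candY_mem.mp hc
      rw [PySem.Str.find_eq] at hf
      have hinf : pv.1.toList <:+: line.toList := by
        by_contra hni
        exact hf ((PySem.Chars.find_eq_neg_one_iff _ _).mpr hni)
      obtain ⟨j0, hj0⟩ := (PySem.Chars.exists_prefix_drop_iff_isIn pv.1.toList line.toList).mpr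
        ((PySem.Chars.isIn_iff_infix _ _).mpr hinf)
      have hj0len : j0 < line.toList.length :=
        matchI_lt_length ⟨pv, hpv, hj0⟩
      rw [PySem.Str.rfind_eq]
      unfold PySem.Chars.rfind
      rcases rfind_go_spec line.toList pv.1.toList line.toList.length with
        ⟨-, hall⟩ | ⟨j, hj, hp, heq, -⟩
      · exact absurd hj0 (hall j0 (by omega))
      · rw [heq]
        have hjG : j ≤ jG := by
          by_contra hgt
          exact hGmax j (by omega) ⟨pv, hpv, hp⟩
        rcases Nat.lt_or_ge j jG with h | h
        · omega
        · have hjeq : j = jG := by omega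
          have : pv = pvG := match_unique hpv hpvG (hjeq ▸ hp) hpreG
          subst this
          exfalso
          apply hcne
          rw [PySem.Str.rfind_eq]
          unfold PySem.Chars.rfind
          rw [heq, hjeq]
    -- evaluate A
    have hA : lineValA line = pvF.2 * 10 + pvG.2 := by
      unfold lineValA
      rw [foldA_decompose]
      rcases hcx : entriesA.flatMap (candOfX line) with _ | ⟨c, cs⟩
      · rw [hcx] at hmemX; exact absurd hmemX (by simp)
      rcases hcy : entriesA.flatMap (candOfY line) with _ | ⟨d, ds⟩
      · rw [hcy] at hmemY; exact absurd hmemY (by simp)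
      rw [hcx] at hmemX hminX
      rw [hcy] at hmemY hmaxY
      have hstep1 : stepX (none, 0) c = (some c.1, c.2) := by simp [stepX, noneOrLt]
      have hstep2 : stepY (none, 0) d = (some d.1, d.2) := by simp [stepY, noneOrGt]
      rw [List.foldl_cons, List.foldl_cons, hstep1, hstep2,
        foldl_stepX_some, foldl_stepY_some]
      have hselL : selL (c.1, c.2) cs = ((iF : Int), pvF.2) :=
        selL_eq_of_min (by simpa using hmemX) (by simpa using hminX)
      have hselG : selG (d.1, d.2) ds = ((jG : Int), pvG.2) :=
        selG_eq_of_max (by simpa using hmemY) (by simpa using hmaxY)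
      rw [hselL, hselG]
    -- evaluate B
    have hfiF : matchAtB line iF = some pvF.2 := matchAtB_eq_some hpvF hpreF
    have hfjG : matchAtB line jG = some pvG.2 := matchAtB_eq_some hpvG hpreG
    have hhead : (List.range line.toList.length).findSome? (matchAtB line) = some pvF.2 := by
      rw [show line.toList.length = iF + (line.toList.length - iF) by omega, List.range_add,
        List.findSome?_append]
      have h1 : List.findSome? (matchAtB line) (List.range iF) = none :=
        List.findSome?_eq_none_iff.mpr (fun j hj =>
          matchAtB_eq_none_iff.mpr (hFmin j (List.mem_range.mp hj)))
      rw [h1, Option.none_or]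
      rw [show line.toList.length - iF = (line.toList.length - iF - 1) + 1 by omega,
        List.range_succ_eq_map, List.map_cons, List.findSome?_cons]
      simp [hfiF]
    have hlast : List.findSome? (matchAtB line) (List.range line.toList.length).reverse =
        some pvG.2 := by
      rw [show line.toList.length = (jG + 1) + (line.toList.length - (jG + 1)) by omega,
        List.range_add, List.reverse_append, List.findSome?_append]
      have h1 : List.findSome? (matchAtB line)
          ((List.map (fun x => jG + 1 + x) (List.range (line.toList.length - (jG + 1)))).reverse)
            = none := by
        refine List.findSome?_eq_none_iff.mpr (fun j hj => ?_)
        rw [List.mem_reverse, List.mem_map] at hj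
        obtain ⟨x, -, rfl⟩ := hj
        exact matchAtB_eq_none_iff.mpr (hGmax _ (by omega))
      rw [h1, Option.none_or]
      rw [List.range_succ, List.reverse_append]
      simp [hfjG]
    have hB : lineValB line = pvF.2 * 10 + pvG.2 := by
      unfold lineValB
      rcases hv : (List.range line.toList.length).filterMap (matchAtB line) with _ | ⟨a, rest⟩
      · exfalso
        have := List.head?_filterMap (f := matchAtB line) (l := List.range line.toList.length)
        rw [hv, hhead] at this
        exact absurd this.symm (by simp)
      · have hh := List.head?_filterMap (f := matchAtB line) (l := List.range line.toList.length)
        rw [hv, hhead] at hh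
        have ha : a = pvF.2 := by simpa using hh
        have hg := List.getLast?_filterMap (f := matchAtB line) (l := List.range line.toList.length)
        rw [hv, hlast] at hg
        have hgl : (a :: rest).getLast (by simp) = pvG.2 := by
          rw [List.getLast?_eq_some_getLast (l := a :: rest) (by simp)] at hg
          simpa using hg
        subst ha
        show pvF.2 * 10 + (pvF.2 :: rest).getLast (by simp) = pvF.2 * 10 + pvG.2
        rw [hgl]
    rw [hA, hB]
  · -- no pattern matches anywhere
    have hfind : ∀ pv ∈ patternsB, PySem.Str.find line pv.1 = -1 := by
      intro pv hpv
      rw [PySem.Str.find_eq, PySem.Chars.find_eq_neg_one_iff]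
      intro hinf
      obtain ⟨j, hj⟩ := (PySem.Chars.exists_prefix_drop_iff_isIn pv.1.toList line.toList).mpr
        ((PySem.Chars.isIn_iff_infix _ _).mpr hinf)
      exact hex ⟨j, pv, hpv, hj⟩
    have hcX : entriesA.flatMap (candOfX line) = [] := by
      rw [List.flatMap_eq_nil_iff]
      intro kv hkv
      unfold candOfX
      rw [if_neg (by simpa using hfind _ (entries_to_patterns kv hkv).1),
        if_neg (by simpa using hfind _ (entries_to_patterns kv hkv).2)]
      rfl
    have hcY : entriesA.flatMap (candOfY line) = [] := by
      rw [List.flatMap_eq_nil_iff]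
      intro kv hkv
      unfold candOfY
      rw [if_neg (by simpa using hfind _ (entries_to_patterns kv hkv).1),
        if_neg (by simpa using hfind _ (entries_to_patterns kv hkv).2)]
      rfl
    have hA : lineValA line = 0 := by
      unfold lineValA
      rw [foldA_decompose, hcX, hcY]
      simp
    have hB : lineValB line = 0 := by
      unfold lineValB
      have hv : (List.range line.toList.length).filterMap (matchAtB line) = [] :=
        List.filterMap_eq_nil_iff.mpr (fun i _ =>
          matchAtB_eq_none_iff.mpr (fun hm => hex ⟨i, hm⟩))
      rw [hv]
    rw [hA, hB]

theorem part2_eq_aux (inp : List String) : part2 inp = part2_alt inp := by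
  unfold part2 part2_alt
  have h : ∀ (s : Int) (xs : List String),
      xs.foldl (fun S line => S + lineValA line) s =
        xs.foldl (fun total line => total + lineValB line) s := by
    intro s xs
    induction xs generalizing s with
    | nil => rfl
    | cons x xs ih => rw [List.foldl_cons, List.foldl_cons, lineVal_eq, ih]
  exact h 0 inp

-- ===== VERDICT (by name: the statement is the Claim_ definition above) =====
theorem part2_spec : Claim_equal_part2 := by
  intro inp _
  unfold Spec_part2
  exact part2_eq_aux inp
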